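-- pv_equiv track=rewrite | github.com/PR713/university-courses | algorithms-and-data-structures/WDI/41.a.popr_podciag_arytm.py | check
-- ===== SOURCE A (Python) =====
-- def check(T):
--     n = len(T)
--     cnt_r1 = 2
--     cnt_r2 = 2
--     cnt = 0
--     for i in range(1,n-1):
--         for j in range(i+1,n):
--             if T[i] - T[i-1] == T[j] - T[i]:
--                 cnt = 3
--                 r = T[i] - T[i-1]
--                 a = j
--                 while a + 1 < n:
--                     if T[a+1] - T[a] == r:
--                         cnt += 1
--                         a += 1
--                     else: break
--                 if r > 0 and cnt > cnt_r1:
--                     cnt_r1 = cnt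
--                 if r < 0 and cnt > cnt_r2:
--                     cnt_r2 = cnt
--     return cnt_r1, cnt_r2
-- ===== SOURCE B (Python) =====
-- def check(T):
--     # One right-to-left pass: hash maps over (value, step) replace the O(n^2) pair scan
--     # and a running run-length replaces the inner while loop.
--     n = len(T)
--     best1 = 2
--     best2 = 2
--     seen = set()          # values T[j] for j already passed (j > i)
--     best = {}             # (T[j], T[j+1]-T[j]) -> max run length E[j] over passed j <= n-2
--     e_next = 0            # E[j+1] from the previous iteration
--     for i in range(n - 2, 0, -1):
--         j = i + 1
--         seen.add(T[j])
--         if j < n - 1: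
--             d = T[j + 1] - T[j]
--             e = e_next + 1 if (j + 2 < n and T[j + 2] - T[j + 1] == d) else 1
--             key = (T[j], d)
--             if best.get(key, 0) < e:
--                 best[key] = e
--             e_next = e
--         r = T[i] - T[i - 1]
--         v = T[i] + r
--         if v in seen:
--             c = 3 + best.get((v, r), 0)
--             if r > 0 and c > best1:
--                 best1 = c
--             if r < 0 and c > best2:
--                 best2 = c
--     return best1, best2
-- ===== Notes on version B (the rewrite author's own statement) =====
-- stated objective: faster
-- what changed: A scans all index pairs (i,j) and re-walks the tail run for each hit (O(n^3)); B makes one right-to-left pass keeping a set of seen values, a hash map (value, step) -> longest run length, and an incrementally maintained run length, answering each i by one dictionary lookup.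
import Mathlib
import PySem

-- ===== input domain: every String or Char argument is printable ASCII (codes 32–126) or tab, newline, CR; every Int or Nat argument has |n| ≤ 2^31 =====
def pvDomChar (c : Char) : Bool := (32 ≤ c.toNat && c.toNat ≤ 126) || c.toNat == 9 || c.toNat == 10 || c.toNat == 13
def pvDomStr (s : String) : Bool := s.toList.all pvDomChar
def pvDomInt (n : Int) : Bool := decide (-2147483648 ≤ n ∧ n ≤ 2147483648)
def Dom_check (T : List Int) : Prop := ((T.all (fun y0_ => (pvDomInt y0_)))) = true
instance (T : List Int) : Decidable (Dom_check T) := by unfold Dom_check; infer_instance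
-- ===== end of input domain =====

-- B replaces A's nested pair scan + inner while loop by one right-to-left pass with hash
-- maps indexed by (value, step) and a running run-length; return values are identical.

-- shared trivial indexing helper: T[i] (all indices used by either program are in range)
def tg (T : List Int) (i : Int) : Int := (PySem.List.pyGet? T i).getD 0

-- ===== PORT A =====
-- the inner `while a + 1 < n: ...` loop of A; fuel only makes the recursion total
def whileA (T : List Int) (n r : Int) : Nat → Int × Int → Int × Int
  | 0, s => s
  | fuel+1, s =>
    if s.1 + 1 < n then
      if tg T (s.1 + 1) - tg T s.1 = r then whileA T n r fuel (s.1 + 1, s.2 + 1) else s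
    else s

-- body of A's inner `for j in range(i+1, n)` loop
def stepAj (T : List Int) (n i : Int) (s : Int × Int × Int) (j : Int) : Int × Int × Int :=
  if tg T i - tg T (i-1) = tg T j - tg T i then
    let r := tg T i - tg T (i-1)
    let w := whileA T n r T.length (j, 3)
    let cnt := w.2
    let c1 := if r > 0 ∧ cnt > s.1 then cnt else s.1
    let c2 := if r < 0 ∧ cnt > s.2.1 then cnt else s.2.1
    (c1, c2, cnt)
  else s

-- body of A's outer `for i in range(1, n-1)` loop
def stepAi (T : List Int) (n : Int) (s : Int × Int × Int) (i : Int) : Int × Int × Int :=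
  (PySem.List.pyRange (i+1) n 1).foldl (stepAj T n i) s

def check (T : List Int) : Int × Int :=
  let n : Int := T.length
  let s := (PySem.List.pyRange 1 (n-1) 1).foldl (stepAi T n) ((2:Int), (2:Int), (0:Int))
  (s.1, s.2.1)

-- ===== PORT B =====
-- B's loop state: (seen values, best : (value, step) → max run length, e_next, best1, best2)
def BState : Type := PySem.Set Int × PySem.Dict (Int × Int) Int × Int × Int × Int

-- B's `if j < n - 1 : ...` block: update of (best, e_next) at j = i+1
def stepBE (T : List Int) (n : Int) (best : PySem.Dict (Int × Int) Int) (eN : Int) (i : Int) :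
    PySem.Dict (Int × Int) Int × Int :=
  if i + 1 < n - 1 then
    let d := tg T (i+2) - tg T (i+1)
    let e := if i + 3 < n ∧ tg T (i+3) - tg T (i+2) = d then eN + 1 else 1
    (if PySem.Dict.getD best (tg T (i+1), d) 0 < e
       then PySem.Dict.insert best (tg T (i+1), d) e else best, e)
  else (best, eN)

-- body of B's single `for i in range(n-2, 0, -1)` loop
def stepB (T : List Int) (n : Int) (st : BState) (i : Int) : BState :=
  let seen := PySem.Set.add st.1 (tg T (i+1))
  let be := stepBE T n st.2.1 st.2.2.1 i
  let r := tg T i - tg T (i-1)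
  let v := tg T i + r
  if PySem.Set.contains seen v then
    let c := 3 + PySem.Dict.getD be.1 (v, r) 0
    let b1 := if r > 0 ∧ c > st.2.2.2.1 then c else st.2.2.2.1
    let b2 := if r < 0 ∧ c > st.2.2.2.2 then c else st.2.2.2.2
    (seen, be.1, be.2, b1, b2)
  else (seen, be.1, be.2, st.2.2.2.1, st.2.2.2.2)

def check_alt (T : List Int) : Int × Int :=
  let n : Int := T.length
  let st := (PySem.List.pyRange (n-2) 0 (-1)).foldl (stepB T n)
    (PySem.Set.empty, PySem.Dict.empty, 0, 2, 2)
  (st.2.2.2.1, st.2.2.2.2)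

-- ===== PRECONDITION & SPEC =====
def Spec_check (T : List Int) (out : Int × Int) : Prop := out = check_alt T
instance (T : List Int) (out : Int × Int) : Decidable (Spec_check T out) := by unfold Spec_check; infer_instance

-- ===== CLAIM (what is proved, stated in full; the proofs are below) =====
def Claim_equal_check : Prop := ∀ (T : List Int), Dom_check T → Spec_check T (check T)

-- ===== LEMMAS AND PROOFS =====

-- spec-level vocabulary ------------------------------------------------------
-- rs T i : the step T[i] - T[i-1]
def rs (T : List Int) (i : Int) : Int := tg T i - tg T (i-1)

-- length of the maximal run of consecutive differences equal to r starting at position j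
def extN (T : List Int) (r : Int) (j : Int) : Int :=
  if h : j + 1 < (T.length : Int) ∧ tg T (j+1) - tg T j = r then extN T r (j+1) + 1 else 0
termination_by ((T.length : Int) - j).toNat
decreasing_by omega

lemma extN_unfold (T : List Int) (r j : Int) :
    extN T r j = if j + 1 < (T.length : Int) ∧ tg T (j+1) - tg T j = r then extN T r (j+1) + 1 else 0 := by
  rw [extN]
  split_ifs <;> rfl

lemma extN_nonneg (T : List Int) (r : Int) : ∀ j, 0 ≤ extN T r j := by
  intro j
  rw [extN_unfold]
  split_ifs with h
  · have := extN_nonneg T r (j+1)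
    omega
  · omega
termination_by j => ((T.length : Int) - j).toNat
decreasing_by omega

-- a valid pair (i, j) of A's double loop, i.e. one on which A's condition fires
def Pv (T : List Int) (i j : Int) : Prop :=
  1 ≤ i ∧ i < j ∧ j < (T.length : Int) ∧ tg T j - tg T i = rs T i

-- the count A computes for such a pair
def cvalue (T : List Int) (i j : Int) : Int := 3 + extN T (rs T i) j

-- `out` is the max of `base` and all values satisfying V (what an `if v > acc` loop computes)
def UpOk (base out : Int) (V : Int → Prop) : Prop :=
  base ≤ out ∧ (∀ x, V x → x ≤ out) ∧ (out = base ∨ V out)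

-- candidate values of pairs with i ≥ m whose step satisfies P
def Vals (T : List Int) (m : Int) (P : Int → Prop) (x : Int) : Prop :=
  ∃ i j, Pv T i j ∧ m ≤ i ∧ P (rs T i) ∧ cvalue T i j = x

lemma UpOk_unique {b c c' : Int} {V : Int → Prop} (h : UpOk b c V) (h' : UpOk b c' V) : c = c' := by
  obtain ⟨hb, hub, hach⟩ := h
  obtain ⟨hb', hub', hach'⟩ := h'
  rcases hach with h1 | h1 <;> rcases hach' with h2 | h2
  · omega
  · have := hub _ h2; omega
  · have := hub' _ h1; omega
  · have := hub _ h2; have := hub' _ h1; omega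

lemma UpOk_congr {b c : Int} {V W : Int → Prop} (hVW : ∀ x, V x ↔ W x) (h : UpOk b c V) : UpOk b c W := by
  obtain ⟨hb, hub, hach⟩ := h
  exact ⟨hb, fun x hx => hub x ((hVW x).2 hx), hach.imp id fun hx => (hVW _).1 hx⟩

lemma UpOk_refl {b : Int} {V : Int → Prop} (hV : ∀ x, ¬ V x) : UpOk b b V :=
  ⟨le_refl _, fun x hx => absurd hx (hV x), Or.inl rfl⟩

lemma UpOk_trans {b m o : Int} {V W : Int → Prop} (h1 : UpOk b m V) (h2 : UpOk m o W) :
    UpOk b o (fun x => V x ∨ W x) := by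
  obtain ⟨hb, hub, hach⟩ := h1
  obtain ⟨hb', hub', hach'⟩ := h2
  refine ⟨le_trans hb hb', fun x hx => ?_, ?_⟩
  · rcases hx with hx | hx
    · exact le_trans (hub x hx) hb'
    · exact hub' x hx
  · rcases hach' with h | h
    · rcases hach with h' | h'
      · exact Or.inl (h.trans h')
      · exact Or.inr (Or.inl (h ▸ h'))
    · exact Or.inr (Or.inr h)

-- ===== A-side --------------------------------------------------------------

lemma whileA_spec (T : List Int) (r : Int) :
    ∀ (fuel : Nat) (a cnt : Int), 0 ≤ a → (T.length : Int) ≤ a + fuel →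
      (whileA T (T.length : Int) r fuel (a, cnt)).2 = cnt + extN T r a := by
  intro fuel
  induction fuel with
  | zero =>
    intro a cnt ha hfa
    rw [extN_unfold]
    simp only [whileA]
    split_ifs with h
    · omega
    · omega
  | succ fuel ih =>
    intro a cnt ha hfa
    rw [extN_unfold]
    simp only [whileA]
    by_cases h1 : a + 1 < (T.length : Int)
    · by_cases h2 : tg T (a + 1) - tg T a = r
      · rw [if_pos h1, if_pos h2, if_pos ⟨h1, h2⟩]
        have := ih (a+1) (cnt+1) (by omega) (by push_cast at hfa ⊢; omega)
        rw [this]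
        ring
      · rw [if_pos h1, if_neg h2, if_neg (by tauto)]
        simp
    · rw [if_neg h1, if_neg (by tauto)]
      simp

lemma stepAj_upok1 (T : List Int) (i k : Int) (s : Int × Int × Int)
    (hi : 1 ≤ i) (hik : i < k) (hkn : k < (T.length : Int)) :
    UpOk s.1 (stepAj T (T.length : Int) i s k).1
      (fun x => Pv T i k ∧ 0 < rs T i ∧ cvalue T i k = x) := by
  have hPv : (tg T i - tg T (i-1) = tg T k - tg T i) ↔ Pv T i k := by
    unfold Pv rs
    exact ⟨fun h => ⟨hi, hik, hkn, h.symm⟩, fun h => h.2.2.2.symm⟩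
  have hrs : rs T i = tg T i - tg T (i-1) := rfl
  by_cases hc : tg T i - tg T (i-1) = tg T k - tg T i
  · have hcnt : (whileA T (T.length : Int) (tg T i - tg T (i-1)) T.length (k, 3)).2 = cvalue T i k := by
      rw [whileA_spec T _ T.length k 3 (by omega) (by omega)]
      unfold cvalue
      rw [hrs]
    simp only [stepAj, if_pos hc]
    rw [hcnt]
    by_cases hupd : tg T i - tg T (i-1) > 0 ∧ cvalue T i k > s.1
    · rw [if_pos hupd]
      refine ⟨le_of_lt hupd.2, ?_, Or.inr ⟨hPv.1 hc, by rw [hrs]; exact hupd.1, rfl⟩⟩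
      rintro x ⟨-, -, rfl⟩
      exact le_refl _
    · rw [if_neg hupd]
      refine ⟨le_refl _, ?_, Or.inl rfl⟩
      rintro x ⟨-, hpos, rfl⟩
      rw [hrs] at hpos
      by_contra hgt
      exact hupd ⟨hpos, by omega⟩
  · simp only [stepAj, if_neg hc]
    exact UpOk_refl (by rintro x ⟨hpv, -, -⟩; exact hc (hPv.2 hpv))

lemma stepAj_upok2 (T : List Int) (i k : Int) (s : Int × Int × Int)
    (hi : 1 ≤ i) (hik : i < k) (hkn : k < (T.length : Int)) :
    UpOk s.2.1 (stepAj T (T.length : Int) i s k).2.1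
      (fun x => Pv T i k ∧ rs T i < 0 ∧ cvalue T i k = x) := by
  have hPv : (tg T i - tg T (i-1) = tg T k - tg T i) ↔ Pv T i k := by
    unfold Pv rs
    exact ⟨fun h => ⟨hi, hik, hkn, h.symm⟩, fun h => h.2.2.2.symm⟩
  have hrs : rs T i = tg T i - tg T (i-1) := rfl
  by_cases hc : tg T i - tg T (i-1) = tg T k - tg T i
  · have hcnt : (whileA T (T.length : Int) (tg T i - tg T (i-1)) T.length (k, 3)).2 = cvalue T i k := by
      rw [whileA_spec T _ T.length k 3 (by omega) (by omega)]
      unfold cvalue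
      rw [hrs]
    simp only [stepAj, if_pos hc]
    rw [hcnt]
    by_cases hupd : tg T i - tg T (i-1) < 0 ∧ cvalue T i k > s.2.1
    · rw [if_pos hupd]
      refine ⟨le_of_lt hupd.2, ?_, Or.inr ⟨hPv.1 hc, by rw [hrs]; exact hupd.1, rfl⟩⟩
      rintro x ⟨-, -, rfl⟩
      exact le_refl _
    · rw [if_neg hupd]
      refine ⟨le_refl _, ?_, Or.inl rfl⟩
      rintro x ⟨-, hpos, rfl⟩
      rw [hrs] at hpos
      by_contra hgt
      exact hupd ⟨hpos, by omega⟩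
  · simp only [stepAj, if_neg hc]
    exact UpOk_refl (by rintro x ⟨hpv, -, -⟩; exact hc (hPv.2 hpv))

lemma innerA (T : List Int) (i : Int) (hi : 1 ≤ i) :
    ∀ (m : Nat) (k : Int) (s : Int × Int × Int), ((T.length : Int) - k).toNat = m → i < k →
      UpOk s.1 (((PySem.List.pyRange k (T.length : Int) 1).foldl (stepAj T (T.length : Int) i) s).1)
        (fun x => ∃ j, k ≤ j ∧ Pv T i j ∧ 0 < rs T i ∧ cvalue T i j = x)
      ∧ UpOk s.2.1 (((PySem.List.pyRange k (T.length : Int) 1).foldl (stepAj T (T.length : Int) i) s).2.1)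
        (fun x => ∃ j, k ≤ j ∧ Pv T i j ∧ rs T i < 0 ∧ cvalue T i j = x) := by
  intro m
  induction m with
  | zero =>
    intro k s hm hik
    rw [PySem.List.pyRange_one_eq_nil (by omega)]
    constructor <;>
      exact UpOk_refl (by rintro x ⟨j, hkj, ⟨-, -, hjn, -⟩, -, -⟩; omega)
  | succ m ih =>
    intro k s hm hik
    have hkn : k < (T.length : Int) := by omega
    rw [PySem.List.pyRange_one_cons (by omega)]
    simp only [List.foldl_cons]
    obtain ⟨ih1, ih2⟩ := ih (k+1) (stepAj T (T.length : Int) i s k) (by omega) (by omega)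
    constructor
    · refine UpOk_congr ?_ (UpOk_trans (stepAj_upok1 T i k s hi hik hkn) ih1)
      intro x
      constructor
      · rintro (⟨hpv, hpos, hcv⟩ | ⟨j, hj, h⟩)
        · exact ⟨k, le_refl _, hpv, hpos, hcv⟩
        · exact ⟨j, by omega, h⟩
      · rintro ⟨j, hkj, hpv, hpos, hcv⟩
        by_cases hjk : j = k
        · subst hjk; exact Or.inl ⟨hpv, hpos, hcv⟩
        · exact Or.inr ⟨j, by omega, hpv, hpos, hcv⟩
    · refine UpOk_congr ?_ (UpOk_trans (stepAj_upok2 T i k s hi hik hkn) ih2)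
      intro x
      constructor
      · rintro (⟨hpv, hpos, hcv⟩ | ⟨j, hj, h⟩)
        · exact ⟨k, le_refl _, hpv, hpos, hcv⟩
        · exact ⟨j, by omega, h⟩
      · rintro ⟨j, hkj, hpv, hpos, hcv⟩
        by_cases hjk : j = k
        · subst hjk; exact Or.inl ⟨hpv, hpos, hcv⟩
        · exact Or.inr ⟨j, by omega, hpv, hpos, hcv⟩

lemma outerA (T : List Int) :
    ∀ (m : Nat) (k : Int) (s : Int × Int × Int), ((T.length : Int) - 1 - k).toNat = m → 1 ≤ k →
      UpOk s.1 (((PySem.List.pyRange k ((T.length : Int) - 1) 1).foldl (stepAi T (T.length : Int)) s).1)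
        (Vals T k (fun r => 0 < r))
      ∧ UpOk s.2.1 (((PySem.List.pyRange k ((T.length : Int) - 1) 1).foldl (stepAi T (T.length : Int)) s).2.1)
        (Vals T k (fun r => r < 0)) := by
  intro m
  induction m with
  | zero =>
    intro k s hm hk1
    rw [PySem.List.pyRange_one_eq_nil (by omega)]
    constructor <;>
      exact UpOk_refl (by rintro x ⟨i, j, ⟨-, hij, hjn, -⟩, hki, -, -⟩; omega)
  | succ m ih =>
    intro k s hm hk1
    have hkn : k < (T.length : Int) - 1 := by omega
    rw [PySem.List.pyRange_one_cons (by omega)]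
    simp only [List.foldl_cons]
    have hstep : stepAi T (T.length : Int) s k
        = (PySem.List.pyRange (k+1) (T.length : Int) 1).foldl (stepAj T (T.length : Int) k) s := rfl
    rw [hstep]
    obtain ⟨in1, in2⟩ := innerA T k hk1 ((T.length : Int) - (k+1)).toNat (k+1) s rfl (by omega)
    obtain ⟨ih1, ih2⟩ := ih (k+1)
      ((PySem.List.pyRange (k+1) (T.length : Int) 1).foldl (stepAj T (T.length : Int) k) s)
      (by omega) (by omega)
    constructor
    · refine UpOk_congr ?_ (UpOk_trans in1 ih1)
      intro x
      constructor
      · rintro (⟨j, -, hpv, hpos, hcv⟩ | ⟨i, j, hpv, hki, hpos, hcv⟩)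
        · exact ⟨k, j, hpv, le_refl _, hpos, hcv⟩
        · exact ⟨i, j, hpv, by omega, hpos, hcv⟩
      · rintro ⟨i, j, hpv, hki, hpos, hcv⟩
        by_cases hik : i = k
        · subst hik
          exact Or.inl ⟨j, by have := hpv.2.1; omega, hpv, hpos, hcv⟩
        · exact Or.inr ⟨i, j, hpv, by omega, hpos, hcv⟩
    · refine UpOk_congr ?_ (UpOk_trans in2 ih2)
      intro x
      constructor
      · rintro (⟨j, -, hpv, hpos, hcv⟩ | ⟨i, j, hpv, hki, hpos, hcv⟩)
        · exact ⟨k, j, hpv, le_refl _, hpos, hcv⟩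
        · exact ⟨i, j, hpv, by omega, hpos, hcv⟩
      · rintro ⟨i, j, hpv, hki, hpos, hcv⟩
        by_cases hik : i = k
        · subst hik
          exact Or.inl ⟨j, by have := hpv.2.1; omega, hpv, hpos, hcv⟩
        · exact Or.inr ⟨i, j, hpv, by omega, hpos, hcv⟩

lemma checkA (T : List Int) :
    UpOk 2 (check T).1 (Vals T 1 (fun r => 0 < r)) ∧
    UpOk 2 (check T).2 (Vals T 1 (fun r => r < 0)) := by
  obtain ⟨h1, h2⟩ := outerA T ((T.length : Int) - 1 - 1).toNat 1 ((2:Int), (2:Int), (0:Int)) rfl (le_refl 1)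
  exact ⟨h1, h2⟩

-- ===== B-side --------------------------------------------------------------

structure InvB (T : List Int) (k : Int) (st : BState) : Prop where
  seen : ∀ v, v ∈ st.1 ↔ ∃ j, k + 2 ≤ j ∧ j < (T.length : Int) ∧ tg T j = v
  bub : ∀ j v d, k + 2 ≤ j → j ≤ (T.length : Int) - 2 → tg T j = v → tg T (j+1) - tg T j = d →
        extN T d j ≤ (st.2.1).getD (v, d) 0
  bach : ∀ v d, (st.2.1).getD (v, d) 0 = 0 ∨ ∃ j, k + 2 ≤ j ∧ j ≤ (T.length : Int) - 2 ∧ tg T j = v ∧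
         tg T (j+1) - tg T j = d ∧ extN T d j = (st.2.1).getD (v, d) 0
  en : st.2.2.1 = if k + 2 ≤ (T.length : Int) - 2 then extN T (tg T (k+3) - tg T (k+2)) (k+2) else 0
  p1 : UpOk 2 st.2.2.2.1 (Vals T (k+1) (fun r => 0 < r))
  p2 : UpOk 2 st.2.2.2.2 (Vals T (k+1) (fun r => r < 0))

lemma stepBE_spec (T : List Int) (k : Int) (best : PySem.Dict (Int × Int) Int) (eN : Int)
    (_hk : 1 ≤ k) (hkn : k ≤ (T.length : Int) - 2)
    (hbub : ∀ j v d, k + 2 ≤ j → j ≤ (T.length : Int) - 2 → tg T j = v → tg T (j+1) - tg T j = d →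
      extN T d j ≤ best.getD (v, d) 0)
    (hbach : ∀ v d, best.getD (v, d) 0 = 0 ∨ ∃ j, k + 2 ≤ j ∧ j ≤ (T.length : Int) - 2 ∧ tg T j = v ∧
      tg T (j+1) - tg T j = d ∧ extN T d j = best.getD (v, d) 0)
    (hen : eN = if k + 2 ≤ (T.length : Int) - 2 then extN T (tg T (k+3) - tg T (k+2)) (k+2) else 0)
    (hnn : ∀ v d, 0 ≤ best.getD (v, d) 0) :
    (∀ j v d, k + 1 ≤ j → j ≤ (T.length : Int) - 2 → tg T j = v → tg T (j+1) - tg T j = d →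
      extN T d j ≤ (stepBE T (T.length : Int) best eN k).1.getD (v, d) 0)
    ∧ (∀ v d, (stepBE T (T.length : Int) best eN k).1.getD (v, d) 0 = 0 ∨
        ∃ j, k + 1 ≤ j ∧ j ≤ (T.length : Int) - 2 ∧ tg T j = v ∧ tg T (j+1) - tg T j = d ∧
          extN T d j = (stepBE T (T.length : Int) best eN k).1.getD (v, d) 0)
    ∧ (stepBE T (T.length : Int) best eN k).2 =
        (if k + 1 ≤ (T.length : Int) - 2 then extN T (tg T (k+2) - tg T (k+1)) (k+1) else 0)
    ∧ (∀ v d, 0 ≤ (stepBE T (T.length : Int) best eN k).1.getD (v, d) 0) := by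
  by_cases hbr : k + 1 < (T.length : Int) - 1
  · have he : (if k + 3 < (T.length : Int) ∧ tg T (k+3) - tg T (k+2) = tg T (k+2) - tg T (k+1)
        then eN + 1 else 1) = extN T (tg T (k+2) - tg T (k+1)) (k+1) := by
      rw [extN_unfold T _ (k+1), show k + 1 + 1 = k + 2 by ring,
        if_pos (⟨by omega, rfl⟩ : k + 2 < (T.length : Int) ∧
          tg T (k+2) - tg T (k+1) = tg T (k+2) - tg T (k+1))]
      by_cases hee : k + 3 < (T.length : Int) ∧ tg T (k+3) - tg T (k+2) = tg T (k+2) - tg T (k+1)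
      · rw [if_pos hee, hen, if_pos (by omega : k + 2 ≤ (T.length : Int) - 2), hee.2]
      · rw [if_neg hee]
        have h0 : extN T (tg T (k+2) - tg T (k+1)) (k+2) = 0 := by
          rw [extN_unfold T _ (k+2), show k + 2 + 1 = k + 3 by ring, if_neg hee]
        rw [h0]
        norm_num
    simp only [stepBE, if_pos hbr]
    rw [he]
    have hget : ∀ v d,
        (if best.getD (tg T (k+1), tg T (k+2) - tg T (k+1)) 0 < extN T (tg T (k+2) - tg T (k+1)) (k+1)
          then best.insert (tg T (k+1), tg T (k+2) - tg T (k+1)) (extN T (tg T (k+2) - tg T (k+1)) (k+1))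
          else best).getD (v, d) 0
        = if (v, d) = (tg T (k+1), tg T (k+2) - tg T (k+1)) ∧
              best.getD (tg T (k+1), tg T (k+2) - tg T (k+1)) 0 < extN T (tg T (k+2) - tg T (k+1)) (k+1)
            then extN T (tg T (k+2) - tg T (k+1)) (k+1) else best.getD (v, d) 0 := by
      intro v d
      by_cases hins : best.getD (tg T (k+1), tg T (k+2) - tg T (k+1)) 0 < extN T (tg T (k+2) - tg T (k+1)) (k+1)
      · rw [if_pos hins, PySem.Dict.getD_insert]
        by_cases hvd : (v, d) = (tg T (k+1), tg T (k+2) - tg T (k+1))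
        · rw [if_pos hvd, if_pos ⟨hvd, hins⟩]
        · rw [if_neg hvd, if_neg (by tauto)]
      · rw [if_neg hins, if_neg (by tauto)]
    refine ⟨?_, ?_, ?_, ?_⟩
    · intro j v d hj1 hj2 hjv hjd
      rw [hget]
      by_cases hjk : j = k + 1
      · subst hjk
        rw [show k + 1 + 1 = k + 2 by ring] at hjd
        subst hjv
        subst hjd
        split_ifs with hif
        · exact le_refl _
        · have hni : ¬ best.getD (tg T (k+1), tg T (k+2) - tg T (k+1)) 0 <
              extN T (tg T (k+2) - tg T (k+1)) (k+1) := fun hc => hif ⟨rfl, hc⟩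
          omega
      · have hold := hbub j v d (by omega) hj2 hjv hjd
        split_ifs with hif
        · have hv : v = tg T (k+1) := congrArg Prod.fst hif.1
          have hd : d = tg T (k+2) - tg T (k+1) := congrArg Prod.snd hif.1
          rw [hv, hd] at hold
          have hlt := hif.2
          rw [hd]
          omega
        · exact hold
    · intro v d
      rw [hget]
      split_ifs with hif
      · have hv : v = tg T (k+1) := congrArg Prod.fst hif.1
        have hd : d = tg T (k+2) - tg T (k+1) := congrArg Prod.snd hif.1
        subst hv
        subst hd
        exact Or.inr ⟨k+1, le_refl _, by omega, rfl,
          by rw [show k + 1 + 1 = k + 2 by ring], rfl⟩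
      · rcases hbach v d with h0 | ⟨j, h1, h2, h3, h4, h5⟩
        · exact Or.inl h0
        · exact Or.inr ⟨j, by omega, h2, h3, h4, h5⟩
    · rw [if_pos (by omega : k + 1 ≤ (T.length : Int) - 2)]
    · intro v d
      rw [hget]
      split_ifs with hif
      · exact extN_nonneg T _ _
      · exact hnn v d
  · simp only [stepBE, if_neg hbr]
    refine ⟨?_, ?_, ?_, hnn⟩
    · intro j v d hj1 hj2 hjv hjd
      exact absurd hj1 (by omega)
    · intro v d
      rcases hbach v d with h0 | ⟨j, h1, h2, h3, h4, h5⟩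
      · exact Or.inl h0
      · exact Or.inr ⟨j, by omega, h2, h3, h4, h5⟩
    · rw [if_neg (by omega), hen, if_neg (by omega)]

lemma stepB_inv (T : List Int) (k : Int) (st : BState)
    (hk : 1 ≤ k) (hkn : k ≤ (T.length : Int) - 2) (h : InvB T k st) :
    InvB T (k-1) (stepB T (T.length : Int) st k) := by
  obtain ⟨seen, best, eN, b1, b2⟩ := st
  obtain ⟨hseen, hbub, hbach, hen, hp1, hp2⟩ := h
  dsimp only at hseen hbub hbach hen hp1 hp2
  have hnn : ∀ v d, 0 ≤ best.getD (v, d) 0 := by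
    intro v d
    rcases hbach v d with h0 | ⟨j, _, _, _, _, hej⟩
    · omega
    · have := extN_nonneg T d j
      omega
  obtain ⟨hbub', hbach', hen', hnn'⟩ := stepBE_spec T k best eN hk hkn hbub hbach hen hnn
  have hseen' : ∀ v, v ∈ PySem.Set.add seen (tg T (k+1)) ↔
      ∃ j, k + 1 ≤ j ∧ j < (T.length : Int) ∧ tg T j = v := by
    intro v
    rw [PySem.Set.mem_add]
    constructor
    · rintro (hv | rfl)
      · obtain ⟨j, h1, h2, h3⟩ := (hseen v).1 hv
        exact ⟨j, by omega, h2, h3⟩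
      · exact ⟨k+1, le_refl _, by omega, rfl⟩
    · rintro ⟨j, h1, h2, h3⟩
      by_cases hj : j = k + 1
      · subst hj
        exact Or.inr h3.symm
      · exact Or.inl ((hseen v).2 ⟨j, by omega, h2, h3⟩)
  have hrsk : rs T k = tg T k - tg T (k-1) := rfl
  have hPvq : ∀ j, Pv T k j ↔
      (k + 1 ≤ j ∧ j < (T.length : Int) ∧ tg T j = tg T k + (tg T k - tg T (k-1))) := by
    intro j
    unfold Pv rs
    constructor
    · rintro ⟨-, h2, h3, h4⟩
      exact ⟨by omega, h3, by omega⟩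
    · rintro ⟨h1, h2, h3⟩
      exact ⟨hk, by omega, h2, by omega⟩
  simp only [stepB]
  by_cases hct : PySem.Set.contains (PySem.Set.add seen (tg T (k+1)))
      (tg T k + (tg T k - tg T (k-1))) = true
  · -- some partner j exists for i = k
    have hub_c : ∀ j, Pv T k j → cvalue T k j ≤
        3 + (stepBE T (T.length : Int) best eN k).1.getD
          (tg T k + (tg T k - tg T (k-1)), tg T k - tg T (k-1)) 0 := by
      intro j hpv
      obtain ⟨hj1, hjn, hjv⟩ := (hPvq j).1 hpv
      by_cases hcnd : j + 1 < (T.length : Int) ∧ tg T (j+1) - tg T j = tg T k - tg T (k-1)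
      · have hle := hbub' j _ _ hj1 (by omega) hjv hcnd.2
        unfold cvalue rs
        omega
      · have h0 : extN T (tg T k - tg T (k-1)) j = 0 := by
          rw [extN_unfold, if_neg hcnd]
        have := hnn' (tg T k + (tg T k - tg T (k-1))) (tg T k - tg T (k-1))
        unfold cvalue rs
        omega
    have hach_c : ∃ j, Pv T k j ∧ cvalue T k j =
        3 + (stepBE T (T.length : Int) best eN k).1.getD
          (tg T k + (tg T k - tg T (k-1)), tg T k - tg T (k-1)) 0 := by
      rcases hbach' (tg T k + (tg T k - tg T (k-1))) (tg T k - tg T (k-1)) with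
        h0 | ⟨j1, hj1, hj2, hj3, hj4, hj5⟩
      · obtain ⟨j0, hj01, hj02, hj03⟩ := (hseen' _).1 (List.mem_of_elem_eq_true hct)
        refine ⟨j0, (hPvq j0).2 ⟨hj01, hj02, hj03⟩, ?_⟩
        have hz : extN T (tg T k - tg T (k-1)) j0 = 0 := by
          by_cases hcnd : j0 + 1 < (T.length : Int) ∧ tg T (j0+1) - tg T j0 = tg T k - tg T (k-1)
          · have hle := hbub' j0 _ _ hj01 (by omega) hj03 hcnd.2
            have hpos : 1 ≤ extN T (tg T k - tg T (k-1)) j0 := by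
              rw [extN_unfold, if_pos hcnd]
              have := extN_nonneg T (tg T k - tg T (k-1)) (j0+1)
              omega
            omega
          · rw [extN_unfold, if_neg hcnd]
        unfold cvalue rs
        omega
      · refine ⟨j1, (hPvq j1).2 ⟨hj1, by omega, hj3⟩, ?_⟩
        unfold cvalue rs
        omega
    rw [if_pos hct]
    refine ⟨?_, ?_, ?_, ?_, ?_, ?_⟩
    · intro v
      rw [show k - 1 + 2 = k + 1 by ring]
      exact hseen' v
    · intro j v d h1 h2 h3 h4
      exact hbub' j v d (by omega) h2 h3 h4
    · intro v d
      rcases hbach' v d with h0 | ⟨j, h1, h2, h3, h4, h5⟩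
      · exact Or.inl h0
      · exact Or.inr ⟨j, by omega, h2, h3, h4, h5⟩
    · rw [show k - 1 + 2 = k + 1 by ring, show k - 1 + 3 = k + 2 by ring]
      exact hen'
    · -- best1 component
      dsimp only
      rw [show k - 1 + 1 = k by ring]
      obtain ⟨hpb, hpub, hpach⟩ := hp1
      by_cases hupd : tg T k - tg T (k-1) > 0 ∧
          3 + (stepBE T (T.length : Int) best eN k).1.getD
            (tg T k + (tg T k - tg T (k-1)), tg T k - tg T (k-1)) 0 > b1
      · rw [if_pos hupd]
        refine ⟨by omega, ?_, ?_⟩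
        · rintro x ⟨i, j, hpv, hki, hpos, rfl⟩
          by_cases hik : i = k
          · subst hik
            exact hub_c j hpv
          · have := hpub _ ⟨i, j, hpv, by omega, hpos, rfl⟩
            omega
        · obtain ⟨j, hpv, hcv⟩ := hach_c
          exact Or.inr ⟨k, j, hpv, le_refl _, by rw [hrsk]; exact hupd.1, hcv.symm ▸ rfl⟩
      · rw [if_neg hupd]
        refine ⟨hpb, ?_, ?_⟩
        · rintro x ⟨i, j, hpv, hki, hpos, rfl⟩
          by_cases hik : i = k
          · subst hik
            rw [hrsk] at hpos
            have := hub_c j hpv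
            omega
          · exact hpub _ ⟨i, j, hpv, by omega, hpos, rfl⟩
        · rcases hpach with h2 | ⟨i, j, hpv, hki, hpos, hcv⟩
          · exact Or.inl h2
          · exact Or.inr ⟨i, j, hpv, by omega, hpos, hcv⟩
    · -- best2 component
      dsimp only
      rw [show k - 1 + 1 = k by ring]
      obtain ⟨hpb, hpub, hpach⟩ := hp2
      by_cases hupd : tg T k - tg T (k-1) < 0 ∧
          3 + (stepBE T (T.length : Int) best eN k).1.getD
            (tg T k + (tg T k - tg T (k-1)), tg T k - tg T (k-1)) 0 > b2
      · rw [if_pos hupd]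
        refine ⟨by omega, ?_, ?_⟩
        · rintro x ⟨i, j, hpv, hki, hpos, rfl⟩
          by_cases hik : i = k
          · subst hik
            exact hub_c j hpv
          · have := hpub _ ⟨i, j, hpv, by omega, hpos, rfl⟩
            omega
        · obtain ⟨j, hpv, hcv⟩ := hach_c
          exact Or.inr ⟨k, j, hpv, le_refl _, by rw [hrsk]; exact hupd.1, hcv.symm ▸ rfl⟩
      · rw [if_neg hupd]
        refine ⟨hpb, ?_, ?_⟩
        · rintro x ⟨i, j, hpv, hki, hpos, rfl⟩
          by_cases hik : i = k
          · subst hik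
            rw [hrsk] at hpos
            have := hub_c j hpv
            omega
          · exact hpub _ ⟨i, j, hpv, by omega, hpos, rfl⟩
        · rcases hpach with h2 | ⟨i, j, hpv, hki, hpos, hcv⟩
          · exact Or.inl h2
          · exact Or.inr ⟨i, j, hpv, by omega, hpos, hcv⟩
  · -- no partner exists for i = k
    rw [if_neg hct]
    have hnopair : ∀ j, ¬ Pv T k j := by
      intro j hpv
      obtain ⟨hj1, hj2, hj3⟩ := (hPvq j).1 hpv
      exact hct (List.elem_eq_true_of_mem ((hseen' _).2 ⟨j, hj1, hj2, hj3⟩))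
    refine ⟨?_, ?_, ?_, ?_, ?_, ?_⟩
    · intro v
      rw [show k - 1 + 2 = k + 1 by ring]
      exact hseen' v
    · intro j v d h1 h2 h3 h4
      exact hbub' j v d (by omega) h2 h3 h4
    · intro v d
      rcases hbach' v d with h0 | ⟨j, h1, h2, h3, h4, h5⟩
      · exact Or.inl h0
      · exact Or.inr ⟨j, by omega, h2, h3, h4, h5⟩
    · rw [show k - 1 + 2 = k + 1 by ring, show k - 1 + 3 = k + 2 by ring]
      exact hen'
    · dsimp only
      rw [show k - 1 + 1 = k by ring]
      refine UpOk_congr ?_ hp1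
      intro x
      constructor
      · rintro ⟨i, j, hpv, hki, hpos, hcv⟩
        exact ⟨i, j, hpv, by omega, hpos, hcv⟩
      · rintro ⟨i, j, hpv, hki, hpos, hcv⟩
        by_cases hik : i = k
        · subst hik
          exact absurd hpv (hnopair j)
        · exact ⟨i, j, hpv, by omega, hpos, hcv⟩
    · dsimp only
      rw [show k - 1 + 1 = k by ring]
      refine UpOk_congr ?_ hp2
      intro x
      constructor
      · rintro ⟨i, j, hpv, hki, hpos, hcv⟩
        exact ⟨i, j, hpv, by omega, hpos, hcv⟩
      · rintro ⟨i, j, hpv, hki, hpos, hcv⟩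
        by_cases hik : i = k
        · subst hik
          exact absurd hpv (hnopair j)
        · exact ⟨i, j, hpv, by omega, hpos, hcv⟩

lemma foldB (T : List Int) :
    ∀ (m : Nat) (k : Int) (st : BState), k.toNat = m → 0 ≤ k → k ≤ (T.length : Int) - 2 →
      InvB T k st →
      InvB T 0 ((PySem.List.pyRange k 0 (-1)).foldl (stepB T (T.length : Int)) st) := by
  intro m
  induction m with
  | zero =>
    intro k st hm h0 hkn hinv
    have hk0 : k = 0 := by omega
    subst hk0
    rw [PySem.List.pyRange_neg_one_eq_nil (by omega)]
    exact hinv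
  | succ m ih =>
    intro k st hm h0 hkn hinv
    have hk1 : 1 ≤ k := by omega
    rw [PySem.List.pyRange_neg_one_cons (by omega)]
    simp only [List.foldl_cons]
    exact ih (k-1) _ (by omega) (by omega) (by omega) (stepB_inv T k st hk1 hkn hinv)

lemma checkB (T : List Int) :
    UpOk 2 (check_alt T).1 (Vals T 1 (fun r => 0 < r)) ∧
    UpOk 2 (check_alt T).2 (Vals T 1 (fun r => r < 0)) := by
  by_cases hn : 3 ≤ (T.length : Int)
  · have hinit : InvB T ((T.length : Int) - 2)
        (PySem.Set.empty, PySem.Dict.empty, 0, 2, 2) := by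
      refine ⟨?_, ?_, ?_, ?_, ?_, ?_⟩
      · intro v
        constructor
        · rintro ⟨⟩
        · rintro ⟨j, h1, h2, -⟩
          exact absurd h1 (by omega)
      · intro j v d h1 h2 _ _
        exact absurd h1 (by omega)
      · intro v d
        exact Or.inl rfl
      · rw [if_neg (by omega)]
      · exact ⟨le_refl _, by rintro x ⟨i, j, ⟨-, h2, h3, -⟩, hki, -, -⟩; omega, Or.inl rfl⟩
      · exact ⟨le_refl _, by rintro x ⟨i, j, ⟨-, h2, h3, -⟩, hki, -, -⟩; omega, Or.inl rfl⟩
    have hfin := foldB T ((T.length : Int) - 2).toNat ((T.length : Int) - 2)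
      (PySem.Set.empty, PySem.Dict.empty, 0, 2, 2) rfl (by omega) (by omega) hinit
    obtain ⟨-, -, -, -, hp1, hp2⟩ := hfin
    rw [show (0 : Int) + 1 = 1 by ring] at hp1 hp2
    exact ⟨hp1, hp2⟩
  · have hnil : PySem.List.pyRange ((T.length : Int) - 2) 0 (-1) = [] :=
      PySem.List.pyRange_neg_one_eq_nil (by omega)
    simp only [check_alt, hnil, List.foldl_nil]
    constructor <;>
      exact ⟨by norm_num, by rintro x ⟨i, j, ⟨h1, h2, h3, -⟩, -, -, -⟩; omega, Or.inl rfl⟩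

-- ===== VERDICT (by name: the statement is the Claim_ definition above) =====
theorem check_spec : Claim_equal_check := by
  intro T _
  unfold Spec_check
  obtain ⟨ha1, ha2⟩ := checkA T
  obtain ⟨hb1, hb2⟩ := checkB T
  exact Prod.ext (UpOk_unique ha1 hb1) (UpOk_unique ha2 hb2)
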